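-- pv_equiv track=rewrite | github.com/ProgMann228/algorithms_laba2-jpeg- | py_files/AC_DC.py | AC_DC_combine
-- ===== SOURCE A (Python) =====
-- def iDC(diffs):
--     restored = [diffs[0]]
--     for i in range(1, len(diffs)):
--         restored.append(restored[-1] + diffs[i])
--     return restored
--
-- def AC_DC_combine(diffs, ac_blocks):
--     dc_list = iDC(diffs)
--     channel_zig=[]
--     i=0
--     for (ACmas) in ac_blocks:
--         channel_zig.append(([dc_list[i]]+ACmas)) #[] нужны чтобы dc_list[i] был списком а не элементом
--         i+=1
--     return channel_zig
-- ===== SOURCE B (Python) =====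
-- def AC_DC_combine(diffs, ac_blocks):
--     # each DC value is computed independently as the sum of a prefix slice;
--     # no cumulative-sum list and no running accumulator anywhere
--     return [[sum(diffs[:i + 1])] + block for i, block in enumerate(ac_blocks)]
-- ===== Notes on version B (the rewrite author's own statement) =====
-- stated objective: alternative
-- what changed: Replaces the stateful two-pass algorithm (build the cumulative-sum dc_list by carrying restored[-1], then index it per block) by a single comprehension over enumerate(ac_blocks) that computes each DC value independently as sum(diffs[:i+1]) - no intermediate list and no running state, trading O(n+m) for O(n*m).
import Mathlib
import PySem

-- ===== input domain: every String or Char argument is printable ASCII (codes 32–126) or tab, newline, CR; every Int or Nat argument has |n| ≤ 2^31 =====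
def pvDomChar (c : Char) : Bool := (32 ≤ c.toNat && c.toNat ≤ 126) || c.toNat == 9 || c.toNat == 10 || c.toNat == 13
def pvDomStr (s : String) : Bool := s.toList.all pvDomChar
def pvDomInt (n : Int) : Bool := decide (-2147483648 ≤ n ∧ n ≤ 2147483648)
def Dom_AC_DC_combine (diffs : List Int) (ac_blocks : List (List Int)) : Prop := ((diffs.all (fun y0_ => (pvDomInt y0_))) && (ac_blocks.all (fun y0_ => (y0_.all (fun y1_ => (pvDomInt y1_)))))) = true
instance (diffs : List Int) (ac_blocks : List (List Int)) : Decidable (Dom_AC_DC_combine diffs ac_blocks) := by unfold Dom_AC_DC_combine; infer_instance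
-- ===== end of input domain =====

-- B replaces A's stateful two passes (cumulative-sum dc_list, then per-block indexing) by a
-- comprehension computing each DC independently as sum(diffs[:i+1]) (objective: alternative).

-- ===== PORT A =====
-- iDC: restored = [diffs[0]]; for i in range(1, len(diffs)): restored.append(restored[-1] + diffs[i])
def iDC_port (diffs : List Int) : List Int :=
  (PySem.List.pyRange 1 (diffs.length : Int) 1).foldl
    (fun restored i =>
      restored ++ [PySem.List.pyGetD restored (-1) 0 + PySem.List.pyGetD diffs i 0])
    [PySem.List.pyGetD diffs 0 0]

def AC_DC_combine (diffs : List Int) (ac_blocks : List (List Int)) : List (List Int) :=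
  let dc_list := iDC_port diffs
  (ac_blocks.foldl
    (fun (st : List (List Int) × Int) ACmas =>
      (st.1 ++ [[PySem.List.pyGetD dc_list st.2 0] ++ ACmas], st.2 + 1))
    ([], 0)).1

-- ===== PORT B =====
-- [[sum(diffs[:i + 1])] + block for i, block in enumerate(ac_blocks)]
def AC_DC_combine_alt (diffs : List Int) (ac_blocks : List (List Int)) : List (List Int) :=
  (PySem.List.enumerate ac_blocks).map
    (fun p => [(PySem.List.slice diffs none (some (p.1 + 1))).sum] ++ p.2)

-- ===== PRECONDITION & SPEC =====
-- Pre_ excludes exactly the inputs where Python A raises IndexError: empty diffs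
-- (diffs[0]) or more AC blocks than DC diffs (dc_list[i] out of range).
def Pre_AC_DC_combine (diffs : List Int) (ac_blocks : List (List Int)) : Prop :=
  diffs ≠ [] ∧ ac_blocks.length ≤ diffs.length
instance (diffs : List Int) (ac_blocks : List (List Int)) : Decidable (Pre_AC_DC_combine diffs ac_blocks) := by unfold Pre_AC_DC_combine; infer_instance

def pvWitness_AC_DC_combine : List Int × List (List Int) := ([3, -1], [[1, 2], [4]])

def Spec_AC_DC_combine (diffs : List Int) (ac_blocks : List (List Int)) (out : List (List Int)) : Prop := out = AC_DC_combine_alt diffs ac_blocks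
instance (diffs : List Int) (ac_blocks : List (List Int)) (out : List (List Int)) : Decidable (Spec_AC_DC_combine diffs ac_blocks out) := by unfold Spec_AC_DC_combine; infer_instance

-- ===== CLAIM (what is proved, stated in full; the proofs are below) =====
def Claim_equal_AC_DC_combine : Prop := ∀ (diffs : List Int) (ac_blocks : List (List Int)), Dom_AC_DC_combine diffs ac_blocks → Pre_AC_DC_combine diffs ac_blocks → Spec_AC_DC_combine diffs ac_blocks (AC_DC_combine diffs ac_blocks)

-- ===== LEMMAS AND PROOFS =====

-- the k-th DC value: sum of the first k+1 diffs
def pvSum (diffs : List Int) (k : Nat) : Int := (diffs.take (k + 1)).sum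

lemma pvSum_succ (diffs : List Int) (k : Nat) (hk : k + 1 < diffs.length) :
    pvSum diffs (k + 1) = pvSum diffs k + diffs[k + 1] := by
  simp [pvSum, List.take_add_one, List.getElem?_eq_getElem hk]; ring

-- characterization of iDC's fold up to n
lemma iDC_fold_eq (d : Int) (ds : List Int) :
    ∀ n : Nat, 1 ≤ n → n ≤ (d :: ds).length →
    (PySem.List.pyRange 1 (n : Int) 1).foldl
      (fun restored i =>
        restored ++ [PySem.List.pyGetD restored (-1) 0 + PySem.List.pyGetD (d :: ds) i 0])
      [PySem.List.pyGetD (d :: ds) 0 0]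
      = (List.range n).map (pvSum (d :: ds)) := by
  intro n
  induction n with
  | zero => omega
  | succ m ih =>
    intro _ hlen
    by_cases hm : m = 0
    · subst hm
      simp [PySem.List.pyRange_one_eq_nil, PySem.List.pyGetD_zero_cons, pvSum]
    · have h1 : 1 ≤ m := by omega
      have hrange : PySem.List.pyRange 1 ((m + 1 : Nat) : Int) 1
          = PySem.List.pyRange 1 (m : Int) 1 ++ [(m : Int)] := by
        push_cast
        exact PySem.List.pyRange_one_succ_right (by exact_mod_cast h1)
      rw [hrange, List.foldl_append, ih h1 (by omega)]
      have hmlt : m < (d :: ds).length := by omega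
      obtain ⟨k, hk⟩ : ∃ k, m = k + 1 := ⟨m - 1, by omega⟩
      have hlast : PySem.List.pyGetD ((List.range m).map (pvSum (d :: ds))) (-1) 0
          = pvSum (d :: ds) (m - 1) := by
        subst hk
        rw [List.range_succ, List.map_append]
        simp [PySem.List.pyGetD_neg_one_append_singleton]
      have hget : PySem.List.pyGetD (d :: ds) ((m : Nat) : Int) 0 = (d :: ds)[m] := by
        rw [PySem.List.pyGetD_natCast]
        simp [List.getD, List.getElem?_eq_getElem hmlt]
      simp only [List.foldl_cons, List.foldl_nil, hlast, hget]
      rw [List.range_succ, List.map_append]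
      congr 1
      subst hk
      simp [pvSum_succ (d :: ds) k hmlt]

lemma iDC_eq (diffs : List Int) (h : diffs ≠ []) :
    iDC_port diffs = (List.range diffs.length).map (pvSum diffs) := by
  obtain ⟨d, ds, rfl⟩ := List.exists_cons_of_ne_nil h
  exact iDC_fold_eq d ds (d :: ds).length (by simp) le_rfl

lemma dc_getD (diffs : List Int) (h : diffs ≠ []) (i : Nat) (hi : i < diffs.length) :
    PySem.List.pyGetD (iDC_port diffs) ((i : Nat) : Int) 0 = pvSum diffs i := by
  rw [iDC_eq diffs h, PySem.List.pyGetD_natCast]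
  simp [List.getD, hi]

-- the per-index specification both sides meet
def pvSpec (diffs : List Int) : Nat → List (List Int) → List (List Int)
  | _, [] => []
  | i, b :: bs => (pvSum diffs i :: b) :: pvSpec diffs (i + 1) bs

lemma A_fold_eq (diffs : List Int) (h : diffs ≠ []) :
    ∀ (bs : List (List Int)) (acc : List (List Int)) (i : Nat),
    i + bs.length ≤ diffs.length →
    (bs.foldl
      (fun (st : List (List Int) × Int) ACmas =>
        (st.1 ++ [[PySem.List.pyGetD (iDC_port diffs) st.2 0] ++ ACmas], st.2 + 1))
      (acc, (i : Int))).1 = acc ++ pvSpec diffs i bs := by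
  intro bs
  induction bs with
  | nil => intro acc i _; simp [pvSpec]
  | cons b bs ih =>
    intro acc i hlen
    have hi : i < diffs.length := by simp at hlen; omega
    have hcast : ((i : Int) + 1) = ((i + 1 : Nat) : Int) := by push_cast; ring
    simp only [List.foldl_cons, hcast, ih _ (i + 1) (by simp at hlen ⊢; omega), pvSpec,
      dc_getD diffs h i hi]
    simp

lemma B_map_eq (diffs : List Int) :
    ∀ (bs : List (List Int)) (i : Nat),
    (PySem.List.enumerate bs (i : Int)).map
      (fun p => [(PySem.List.slice diffs none (some (p.1 + 1))).sum] ++ p.2)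
      = pvSpec diffs i bs := by
  intro bs
  induction bs with
  | nil => intro i; simp [PySem.List.enumerate_nil, pvSpec]
  | cons b bs ih =>
    intro i
    have hcast : ((i : Int) + 1) = ((i + 1 : Nat) : Int) := by push_cast; ring
    rw [PySem.List.enumerate_cons, List.map_cons, hcast, ih (i + 1)]
    simp only [pvSpec, PySem.List.slice_to_natCast, pvSum]
    simp

-- ===== VERDICT (by name: the statement is the Claim_ definition above) =====
theorem AC_DC_combine_spec : Claim_equal_AC_DC_combine := by
  intro diffs ac_blocks _ hpre
  obtain ⟨hne, hlen⟩ := hpre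
  unfold Spec_AC_DC_combine AC_DC_combine AC_DC_combine_alt
  have hA := A_fold_eq diffs hne ac_blocks [] 0 (by omega)
  simp only [Nat.cast_zero] at hA
  rw [hA, List.nil_append]
  have hB := B_map_eq diffs ac_blocks 0
  simp only [Nat.cast_zero] at hB
  rw [hB]
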